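-- pv_equiv track=rewrite | github.com/daniel-reich/ubiquitous-fiesta | HBuWYyh5YCmDKF4uH_1.py | almost_sorted
-- ===== SOURCE A (Python) =====
-- def almost_sorted(lst):
--   def sf(lst):
--     if len(set(lst)) != len(lst):
--       return False
--     v = [lst[i + 1] - lst[i] > 0 for i in range(len(lst) - 1)]
--     return len(set(v)) == 1
--   k = sorted(lst)
--   if (lst == k) or (lst == k[::-1]):
--     return False
--   for i in range(len(lst)):
--     lst1 = lst[:i] + lst[i + 1:]
--     if sf(lst1):
--       return True
--   return False
-- ===== SOURCE B (Python) =====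
-- def almost_sorted(lst):
--     n = len(lst)
--     nondec = all(lst[i] <= lst[i + 1] for i in range(n - 1))
--     noninc = all(lst[i] >= lst[i + 1] for i in range(n - 1))
--     if nondec or noninc:
--         return False
--
--     def one(a):
--         # can one element be removed so that a becomes strictly increasing?
--         bad = [i for i in range(len(a) - 1) if a[i] >= a[i + 1]]
--         if len(bad) != 1:
--             return len(bad) == 0
--         i = bad[0]
--         return (i == 0 or a[i - 1] < a[i + 1]) or (i + 2 == len(a) or a[i] < a[i + 2])
--
--     return one(lst) or one([-x for x in lst])
-- ===== Notes on version B (the rewrite author's own statement) =====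
-- stated objective: faster
-- what changed: Replaced the O(n^2) try-every-removal brute force (sort the list, then for each index rebuild the list without it and re-test monotonicity) by a single-pass O(n) check that counts adjacent violations and inspects only the neighbourhood of the unique violation for each direction.
import Mathlib
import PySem

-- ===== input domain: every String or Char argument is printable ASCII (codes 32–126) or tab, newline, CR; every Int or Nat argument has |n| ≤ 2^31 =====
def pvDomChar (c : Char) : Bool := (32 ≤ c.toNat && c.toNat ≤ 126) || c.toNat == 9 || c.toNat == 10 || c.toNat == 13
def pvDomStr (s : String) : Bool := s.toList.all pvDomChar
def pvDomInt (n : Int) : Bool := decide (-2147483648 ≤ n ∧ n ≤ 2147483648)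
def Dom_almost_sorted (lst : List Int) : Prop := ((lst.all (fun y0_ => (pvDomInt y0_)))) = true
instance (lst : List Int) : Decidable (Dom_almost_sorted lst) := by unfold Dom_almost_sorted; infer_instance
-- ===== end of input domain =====

-- B replaces A's quadratic try-every-removal scan by a linear count of adjacent violations (objective: faster).

-- ===== PORT A =====
-- inner helper sf: distinctness via len(set(..)), then all pairwise-difference signs equal
def pvSf (lst : List Int) : Bool :=
  if PySem.Set.len (PySem.Set.ofList lst) ≠ (lst.length : Int) then false
  else
    let v := (PySem.List.pyRange 0 ((lst.length : Int) - 1) 1).map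
      (fun i => decide (PySem.List.pyGetD lst (i + 1) 0 - PySem.List.pyGetD lst i 0 > 0))
    PySem.Set.len (PySem.Set.ofList v) == 1

def almost_sorted (lst : List Int) : Bool :=
  let k := PySem.List.sorted lst (fun x => x) false
  -- k[::-1] is k.reverse (exact: PySem.List.slice?_none_none_neg_one)
  if lst = k ∨ lst = k.reverse then false
  else
    (PySem.List.pyRange 0 (lst.length : Int) 1).any
      (fun i => pvSf (PySem.List.slice lst none (some i) ++ PySem.List.slice lst (some (i + 1)) none))

-- ===== PORT B =====
-- can one element be removed so that a becomes strictly increasing?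
def pvOne (a : List Int) : Bool :=
  let bad := (PySem.List.pyRange 0 ((a.length : Int) - 1) 1).filter
    (fun i => decide (PySem.List.pyGetD a i 0 ≥ PySem.List.pyGetD a (i + 1) 0))
  if bad.length ≠ 1 then bad.length == 0
  else
    let i := PySem.List.pyGetD bad 0 0
    ((i == 0) || decide (PySem.List.pyGetD a (i - 1) 0 < PySem.List.pyGetD a (i + 1) 0)) ||
      ((i + 2 == (a.length : Int)) || decide (PySem.List.pyGetD a i 0 < PySem.List.pyGetD a (i + 2) 0))

def almost_sorted_alt (lst : List Int) : Bool :=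
  let n : Int := lst.length
  let nondec := (PySem.List.pyRange 0 (n - 1) 1).all
    (fun i => decide (PySem.List.pyGetD lst i 0 ≤ PySem.List.pyGetD lst (i + 1) 0))
  let noninc := (PySem.List.pyRange 0 (n - 1) 1).all
    (fun i => decide (PySem.List.pyGetD lst i 0 ≥ PySem.List.pyGetD lst (i + 1) 0))
  if nondec || noninc then false
  else pvOne lst || pvOne (lst.map (fun x => -x))

-- ===== PRECONDITION & SPEC =====
def Spec_almost_sorted (lst : List Int) (out : Bool) : Prop := out = almost_sorted_alt lst
instance (lst : List Int) (out : Bool) : Decidable (Spec_almost_sorted lst out) := by unfold Spec_almost_sorted; infer_instance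

-- ===== CLAIM (what is proved, stated in full; the proofs are below) =====
def Claim_equal_almost_sorted : Prop := ∀ (lst : List Int), Dom_almost_sorted lst → Spec_almost_sorted lst (almost_sorted lst)

-- ===== LEMMAS AND PROOFS =====

-- adjacent-pairs predicate used throughout the proofs
def pvAdj (R : Int → Int → Prop) (l : List Int) : Prop :=
  ∀ j (h : j + 1 < l.length), R (l[j]'(Nat.lt_of_succ_lt h)) (l[j + 1]'h)

-- the indices of adjacent violations (Nat mirror of B's `bad` list)
def pvBad (a : List Int) : List Nat :=
  (List.range (a.length - 1)).filter (fun k => decide (a.getD (k + 1) 0 ≤ a.getD k 0))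

lemma eq_singleton_of_nodup {α : Type} (s : List α) (b : α) (hn : s.Nodup)
    (hne : s ≠ []) (hb : ∀ x ∈ s, x = b) : s = [b] := by
  cases s with
  | nil => exact absurd rfl hne
  | cons a t =>
    have ha : a = b := hb a (by simp)
    cases t with
    | nil => simp [ha]
    | cons c u =>
      have hc : c = b := hb c (by simp)
      rw [List.nodup_cons] at hn
      exact absurd (show a ∈ c :: u by simp [ha, hc]) hn.1

lemma ofList_len_iff_nodup (l : List Int) :
    ((PySem.Set.ofList l).length = l.length) ↔ l.Nodup := by
  constructor
  · intro h
    have hperm : (PySem.Set.ofList l).Perm l.dedup := by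
      rw [List.perm_ext_iff_of_nodup (PySem.Set.nodup_ofList l) (List.nodup_dedup l)]
      intro x; rw [PySem.Set.mem_ofList, List.mem_dedup]
    have hlen : l.dedup.length = l.length := by rw [← hperm.length_eq, h]
    rw [← List.dedup_eq_self]
    exact (List.dedup_sublist l).eq_of_length hlen
  · intro h
    have hperm : (PySem.Set.ofList l).Perm l := by
      rw [List.perm_ext_iff_of_nodup (PySem.Set.nodup_ofList l) h]
      intro x; exact PySem.Set.mem_ofList l x
    exact hperm.length_eq

lemma bool_set_one (v : List Bool) :
    (PySem.Set.ofList v).length = 1 ↔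
      v ≠ [] ∧ ((∀ x ∈ v, x = true) ∨ (∀ x ∈ v, x = false)) := by
  rw [List.length_eq_one_iff]
  constructor
  · rintro ⟨b, hb⟩
    have hbm : b ∈ v := by rw [← PySem.Set.mem_ofList (xs := v), hb]; simp
    refine ⟨fun h => by simp [h] at hbm, ?_⟩
    have hall : ∀ x ∈ v, x = b := by
      intro x hx
      have : x ∈ PySem.Set.ofList v := (PySem.Set.mem_ofList v x).mpr hx
      rw [hb] at this; simpa using this
    cases b
    · exact Or.inr hall
    · exact Or.inl hall
  · rintro ⟨hne, hall⟩
    have hb : ∃ b, ∀ x ∈ v, x = b := by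
      cases hall with
      | inl h => exact ⟨true, h⟩
      | inr h => exact ⟨false, h⟩
    obtain ⟨b, hb⟩ := hb
    refine ⟨b, eq_singleton_of_nodup _ b (PySem.Set.nodup_ofList v) ?_ ?_⟩
    · intro h
      obtain ⟨x, hx⟩ := List.exists_mem_of_ne_nil v hne
      exact absurd ((PySem.Set.mem_ofList v x).mpr hx) (by simp [h])
    · intro x hx; exact hb x ((PySem.Set.mem_ofList v x).mp hx)

lemma guard1_iff (l : List Int) :
    (l = PySem.List.sorted l (fun x => x) false) ↔ l.Pairwise (· ≤ ·) := by
  constructor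
  · intro h
    have := PySem.List.sorted_pairwise l (fun x => x)
    rw [← h] at this; exact this
  · intro h; exact (PySem.List.sorted_eq_self_of_pairwise l (fun x => x) h).symm

lemma guard2_iff (l : List Int) :
    (l = (PySem.List.sorted l (fun x => x) false).reverse) ↔ l.Pairwise (fun a b => b ≤ a) := by
  rw [show ∀ (x k : List Int), (x = k.reverse) ↔ (x.reverse = k) from
      fun x k => (List.reverse_eq_iff).symm]
  rw [PySem.List.sorted_eq_sorted_of_perm l l.reverse (fun x => x) (fun a b h => h) l.reverse_perm.symm]
  rw [guard1_iff l.reverse, List.pairwise_reverse]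

lemma pvAdj_congr {R S : Int → Int → Prop} (l : List Int) (h : ∀ a b, R a b ↔ S a b) :
    pvAdj R l ↔ pvAdj S l := by
  unfold pvAdj; constructor <;> intro H j hj <;> [exact (h _ _).mp (H j hj); exact (h _ _).mpr (H j hj)]

lemma mem_adj (l : List Int) (P : Int → Int → Prop) :
    (∀ i ∈ PySem.List.pyRange 0 ((l.length : Int) - 1) 1,
      P (PySem.List.pyGetD l i 0) (PySem.List.pyGetD l (i + 1) 0)) ↔ pvAdj P l := by
  constructor
  · intro H j h
    have hm : (j : Int) ∈ PySem.List.pyRange 0 ((l.length : Int) - 1) 1 := by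
      rw [PySem.List.mem_pyRange_one]; omega
    have := H _ hm
    rwa [PySem.List.pyGetD_natCast, show ((j : Int) + 1) = ((j + 1 : Nat) : Int) by push_cast; ring,
      PySem.List.pyGetD_natCast, List.getD_eq_getElem _ _ (by omega), List.getD_eq_getElem _ _ h] at this
  · intro H i hi
    rw [PySem.List.mem_pyRange_one] at hi
    have h0 : i = ((i.toNat : Nat) : Int) := by omega
    have hlt : i.toNat + 1 < l.length := by omega
    rw [h0, PySem.List.pyGetD_natCast, show (((i.toNat : Nat) : Int) + 1) = ((i.toNat + 1 : Nat) : Int) by push_cast; ring,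
      PySem.List.pyGetD_natCast, List.getD_eq_getElem _ _ (by omega), List.getD_eq_getElem _ _ hlt]
    exact H _ hlt

lemma range_nil_iff (l : List Int) :
    (PySem.List.pyRange 0 ((l.length : Int) - 1) 1 = []) ↔ l.length ≤ 1 := by
  rw [List.eq_nil_iff_forall_not_mem]
  constructor
  · intro h
    by_contra hlen
    exact h 0 (PySem.List.mem_pyRange_one.mpr (by omega))
  · intro h i hi
    rw [PySem.List.mem_pyRange_one] at hi; omega

lemma pvSf_iff (l : List Int) :
    pvSf l = true ↔ 2 ≤ l.length ∧ (pvAdj (· < ·) l ∨ pvAdj (fun a b => b < a) l) := by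
  unfold pvSf
  have hlen : PySem.Set.len (PySem.Set.ofList l) = ((PySem.Set.ofList l).length : Int) := rfl
  by_cases hnd : l.Nodup
  · rw [if_neg (by rw [hlen, Int.natCast_inj.ne]; simpa using (ofList_len_iff_nodup l).mpr hnd)]
    rw [show ∀ (v : List Bool), ((PySem.Set.len (PySem.Set.ofList v) == 1) = true ↔
        (PySem.Set.ofList v).length = 1) from fun v => by
      rw [beq_iff_eq]
      show ((((PySem.Set.ofList v).length) : Int) = 1 ↔ _)
      omega]
    rw [bool_set_one]
    rw [show ((PySem.List.pyRange 0 ((l.length : Int) - 1) 1).map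
        (fun i => decide (PySem.List.pyGetD l (i + 1) 0 - PySem.List.pyGetD l i 0 > 0)) ≠ [])
      ↔ 2 ≤ l.length by rw [Ne, List.map_eq_nil_iff, range_nil_iff]; omega]
    have htrue : (∀ x ∈ (PySem.List.pyRange 0 ((l.length : Int) - 1) 1).map
        (fun i => decide (PySem.List.pyGetD l (i + 1) 0 - PySem.List.pyGetD l i 0 > 0)), x = true)
        ↔ pvAdj (· < ·) l := by
      rw [List.forall_mem_map]
      rw [show (∀ i ∈ PySem.List.pyRange 0 ((l.length : Int) - 1) 1,
          decide (PySem.List.pyGetD l (i + 1) 0 - PySem.List.pyGetD l i 0 > 0) = true)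
        ↔ pvAdj (fun a b => 0 < b - a) l from
        Iff.trans (by constructor <;> intro H i hi <;> simpa using H i hi) (mem_adj l _)]
      exact pvAdj_congr l (fun a b => by omega)
    have hfalse : (∀ x ∈ (PySem.List.pyRange 0 ((l.length : Int) - 1) 1).map
        (fun i => decide (PySem.List.pyGetD l (i + 1) 0 - PySem.List.pyGetD l i 0 > 0)), x = false)
        ↔ pvAdj (fun a b => b ≤ a) l := by
      rw [List.forall_mem_map]
      rw [show (∀ i ∈ PySem.List.pyRange 0 ((l.length : Int) - 1) 1,
          decide (PySem.List.pyGetD l (i + 1) 0 - PySem.List.pyGetD l i 0 > 0) = false)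
        ↔ pvAdj (fun a b => ¬ (0 < b - a)) l from
        Iff.trans (by constructor <;> intro H i hi <;> simpa using H i hi) (mem_adj l _)]
      exact pvAdj_congr l (fun a b => by omega)
    rw [htrue, hfalse]
    constructor
    · rintro ⟨h2, htf⟩
      refine ⟨h2, ?_⟩
      cases htf with
      | inl h => exact Or.inl h
      | inr h =>
        refine Or.inr (fun j hj => lt_of_le_of_ne (h j hj) ?_)
        intro heq
        have := hnd.getElem_inj_iff.mp heq
        omega
    · rintro ⟨h2, htf⟩
      refine ⟨h2, ?_⟩
      cases htf with
      | inl h => exact Or.inl h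
      | inr h => exact Or.inr (fun j hj => le_of_lt (h j hj))
  · rw [if_pos (by rw [hlen, Int.natCast_inj.ne]; simpa using fun h => hnd ((ofList_len_iff_nodup l).mp h))]
    simp only [Bool.false_eq_true, false_iff]
    rintro ⟨h2, htf⟩
    apply hnd
    cases htf with
    | inl h =>
      have := ((by rw [← List.isChain_iff_pairwise, List.isChain_iff_getElem]; exact Iff.rfl :
        pvAdj (· < ·) l ↔ l.Pairwise (· < ·))).mp h
      exact this.imp ne_of_lt
    | inr h =>
      have := ((by rw [← @List.isChain_iff_pairwise Int (fun a b => b < a) l ⟨fun h1 h2 => lt_trans h2 h1⟩, List.isChain_iff_getElem]; exact Iff.rfl :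
        pvAdj (fun a b => b < a) l ↔ l.Pairwise (fun a b => b < a))).mp h
      exact this.imp (fun hlt => (ne_of_lt hlt).symm)

lemma A_loop_iff (l : List Int) :
    ((PySem.List.pyRange 0 (l.length : Int) 1).any
      (fun i => pvSf (PySem.List.slice l none (some i) ++ PySem.List.slice l (some (i + 1)) none)) = true)
    ↔ ∃ k < l.length, pvSf (l.eraseIdx k) = true := by
  rw [List.any_eq_true]
  constructor
  · rintro ⟨i, him, hsf⟩
    rw [PySem.List.mem_pyRange_one] at him
    refine ⟨i.toNat, by omega, ?_⟩
    rw [PySem.List.slice_to l him.1, PySem.List.slice_from l (by omega : (0:Int) ≤ i + 1),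
      show (i + 1).toNat = i.toNat + 1 by omega] at hsf
    rw [List.eraseIdx_eq_take_drop_succ]
    exact hsf
  · rintro ⟨k, hk, hsf⟩
    refine ⟨(k : Int), PySem.List.mem_pyRange_one.mpr (by omega), ?_⟩
    rw [PySem.List.slice_to l (by omega : (0:Int) ≤ (k:Int)), PySem.List.slice_from l (by omega : (0:Int) ≤ (k:Int) + 1),
      show ((k:Int) + 1).toNat = k + 1 by omega, Int.toNat_natCast, ← List.eraseIdx_eq_take_drop_succ]
    exact hsf

lemma pvBad_filt (a : List Int) (h1 : 1 ≤ a.length) :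
    (PySem.List.pyRange 0 ((a.length : Int) - 1) 1).filter
      (fun i => decide (PySem.List.pyGetD a i 0 ≥ PySem.List.pyGetD a (i + 1) 0)) =
      (pvBad a).map (fun (k : Nat) => (k : Int)) := by
  rw [show ((a.length : Int) - 1) = ((a.length - 1 : Nat) : Int) by omega,
    PySem.List.pyRange_zero_natCast, List.filter_map, pvBad]
  refine congrArg (List.map _) (List.filter_congr ?_)
  intro k _
  simp only [Function.comp]
  rw [show (((k : Nat) : Int) + 1) = ((k + 1 : Nat) : Int) by push_cast; ring,
    PySem.List.pyGetD_natCast, PySem.List.pyGetD_natCast]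

lemma mem_pvBad (a : List Int) (k : Nat) :
    k ∈ pvBad a ↔ (k + 1 < a.length ∧ ∀ (h : k + 1 < a.length), a[k + 1]'h ≤ a[k]'(by omega)) := by
  rw [pvBad, List.mem_filter, List.mem_range]
  constructor
  · rintro ⟨hk, hpk⟩
    have hk1 : k + 1 < a.length := by omega
    refine ⟨hk1, fun _ => ?_⟩
    rw [decide_eq_true_iff, List.getD_eq_getElem _ _ hk1, List.getD_eq_getElem _ _ (by omega)] at hpk
    exact hpk
  · rintro ⟨hk1, hle⟩
    refine ⟨by omega, ?_⟩
    rw [decide_eq_true_iff, List.getD_eq_getElem _ _ hk1, List.getD_eq_getElem _ _ (by omega)]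
    exact hle hk1

lemma erase_keeps_pair (a : List Int) (j : Nat) (hj : j < a.length)
    (hP : pvAdj (· < ·) (a.eraseIdx j)) :
    ∀ k (hk : k + 1 < a.length), j ≠ k → j ≠ k + 1 →
      a[k]'(by omega) < a[k + 1]'hk := by
  intro k hk hjk hjk1
  have hlen : (a.eraseIdx j).length = a.length - 1 := by
    rw [List.length_eraseIdx]; simp [hj]
  rcases Nat.lt_or_ge j k with hcase | hcase
  · have hk1 : (k - 1) + 1 < (a.eraseIdx j).length := by omega
    have := hP (k - 1) hk1
    have e1 : (a.eraseIdx j)[k - 1]'(by omega) = a[k]'(by omega) := by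
      rw [List.getElem_eraseIdx, dif_neg (by omega)]
      congr 1; omega
    have e2 : (a.eraseIdx j)[(k - 1) + 1]'hk1 = a[k + 1]'(by omega) := by
      rw [List.getElem_eraseIdx, dif_neg (by omega)]
      congr 1; omega
    rwa [e1, e2] at this
  · have hjk2 : k + 1 < j := by omega
    have hk1 : k + 1 < (a.eraseIdx j).length := by omega
    have := hP k hk1
    have e1 : (a.eraseIdx j)[k]'(by omega) = a[k]'(by omega) := by
      rw [List.getElem_eraseIdx, dif_pos (by omega)]
    have e2 : (a.eraseIdx j)[k + 1]'hk1 = a[k + 1]'(by omega) := by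
      rw [List.getElem_eraseIdx, dif_pos (by omega)]
    rwa [e1, e2] at this

lemma pvOne_iff (a : List Int) (h3 : 3 ≤ a.length) :
    pvOne a = true ↔ ∃ k < a.length, pvAdj (· < ·) (a.eraseIdx k) := by
  rw [pvOne]
  simp only [pvBad_filt a (by omega), List.length_map]
  have herlen : ∀ j, j < a.length → (a.eraseIdx j).length = a.length - 1 := by
    intro j hj; rw [List.length_eraseIdx]; simp [hj]
  rcases hBc : pvBad a with _ | ⟨i, _ | ⟨t0, t'⟩⟩
  · -- no violation: a strictly increasing, drop the head
    have hInc : ∀ k (hk : k + 1 < a.length), a[k]'(by omega) < a[k + 1]'hk := by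
      intro k hk
      have hkB : k ∉ pvBad a := by rw [hBc]; simp
      rw [mem_pvBad] at hkB
      push_neg at hkB
      obtain ⟨_, hx⟩ := hkB hk
      exact hx
    simp only [List.map_nil, List.length_nil]
    rw [if_pos (by decide)]
    simp only [beq_self_eq_true, true_iff]
    refine ⟨0, by omega, ?_⟩
    intro j hj
    have e1 : (a.eraseIdx 0)[j]'(by omega) = a[j + 1]'(by rw [herlen 0 (by omega)] at hj; omega) := by
      rw [List.getElem_eraseIdx, dif_neg (by omega)]
    have e2 : (a.eraseIdx 0)[j + 1]'hj = a[j + 1 + 1]'(by rw [herlen 0 (by omega)] at hj; omega) := by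
      rw [List.getElem_eraseIdx, dif_neg (by omega)]
    rw [e1, e2]
    exact hInc (j + 1) (by rw [herlen 0 (by omega)] at hj; omega)
  · -- exactly one violation, at index i
    have hiB : i ∈ pvBad a := by rw [hBc]; simp
    rw [mem_pvBad] at hiB
    obtain ⟨hi1, hile'⟩ := hiB
    have hile := hile' hi1
    have hOnly : ∀ k (hk : k + 1 < a.length), k ≠ i → a[k]'(by omega) < a[k + 1]'hk := by
      intro k hk hki
      have hkB : k ∉ pvBad a := by rw [hBc]; simp [hki]
      rw [mem_pvBad] at hkB
      push_neg at hkB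
      obtain ⟨_, hx⟩ := hkB hk
      exact hx
    simp only [List.map_cons, List.map_nil, List.length_cons, List.length_nil]
    rw [if_neg (by simp)]
    simp only [show PySem.List.pyGetD [(i : Int)] 0 0 = (i : Int) from PySem.List.pyGetD_zero_cons _ _ _]
    have hC : ((((i : Int) == 0) || decide (PySem.List.pyGetD a ((i : Int) - 1) 0 < PySem.List.pyGetD a ((i : Int) + 1) 0)) ||
        (((i : Int) + 2 == (a.length : Int)) || decide (PySem.List.pyGetD a (i : Int) 0 < PySem.List.pyGetD a ((i : Int) + 2) 0))) = true ↔
        ((i = 0 ∨ (0 < i ∧ ∀ (h : 0 < i), a[i - 1]'(by omega) < a[i + 1]'hi1)) ∨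
         (i + 2 = a.length ∨ (i + 2 < a.length ∧ ∀ (h : i + 2 < a.length), a[i]'(by omega) < a[i + 2]'h))) := by
      simp only [Bool.or_eq_true, beq_iff_eq, decide_eq_true_iff]
      by_cases hi0 : i = 0
      · simp [hi0]
      · by_cases hi2 : i + 2 = a.length
        · have hcast : ((i : Int) + 2) = (a.length : Int) := by omega
          simp [hcast, hi2]
        · have hi2' : i + 2 < a.length := by omega
          have e1 : PySem.List.pyGetD a ((i : Int) - 1) 0 = a[i - 1]'(by omega) := by
            rw [show ((i : Int) - 1) = ((i - 1 : Nat) : Int) by omega, PySem.List.pyGetD_natCast,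
              List.getD_eq_getElem _ _ (by omega)]
          have e2 : PySem.List.pyGetD a ((i : Int) + 1) 0 = a[i + 1]'hi1 := by
            rw [show ((i : Int) + 1) = ((i + 1 : Nat) : Int) by omega, PySem.List.pyGetD_natCast,
              List.getD_eq_getElem _ _ hi1]
          have e3 : PySem.List.pyGetD a (i : Int) 0 = a[i]'(by omega) := by
            rw [PySem.List.pyGetD_natCast, List.getD_eq_getElem _ _ (by omega)]
          have e4 : PySem.List.pyGetD a ((i : Int) + 2) 0 = a[i + 2]'hi2' := by
            rw [show ((i : Int) + 2) = ((i + 2 : Nat) : Int) by omega, PySem.List.pyGetD_natCast,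
              List.getD_eq_getElem _ _ hi2']
          rw [e1, e2, e3, e4]
          simp [show ¬((i : Int) = 0) by omega, show ¬((i : Int) + 2 = (a.length : Int)) by omega,
            hi0, hi2, show 0 < i by omega, hi2']
    rw [hC]
    constructor
    · rintro (hl | hr)
      · -- remove a[i]
        refine ⟨i, by omega, ?_⟩
        intro k hk
        have hk' : k + 1 < a.length - 1 := by rw [herlen i (by omega)] at hk; omega
        rcases Nat.lt_trichotomy (k + 1) i with hc | hc | hc
        · have e1 : (a.eraseIdx i)[k]'(by omega) = a[k]'(by omega) := by
            rw [List.getElem_eraseIdx, dif_pos (by omega)]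
          have e2 : (a.eraseIdx i)[k + 1]'hk = a[k + 1]'(by omega) := by
            rw [List.getElem_eraseIdx, dif_pos (by omega)]
          rw [e1, e2]; exact hOnly k (by omega) (by omega)
        · have e1 : (a.eraseIdx i)[k]'(by omega) = a[k]'(by omega) := by
            rw [List.getElem_eraseIdx, dif_pos (by omega)]
          have e2 : (a.eraseIdx i)[k + 1]'hk = a[k + 2]'(by omega) := by
            rw [List.getElem_eraseIdx, dif_neg (by omega)]
          rw [e1, e2]
          have hi0 : i ≠ 0 := by omega
          rcases hl with h0 | ⟨hpos, hlt⟩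
          · omega
          · have : k = i - 1 := by omega
            subst this
            have := hlt hpos
            have ek : a[i - 1]'(by omega) = a[i - 1]'(by omega) := rfl
            convert this using 2 <;> omega
        · have e1 : (a.eraseIdx i)[k]'(by omega) = a[k + 1]'(by omega) := by
            rw [List.getElem_eraseIdx, dif_neg (by omega)]
          have e2 : (a.eraseIdx i)[k + 1]'hk = a[k + 2]'(by omega) := by
            rw [List.getElem_eraseIdx, dif_neg (by omega)]
          rw [e1, e2]; exact hOnly (k + 1) (by omega) (by omega)
      · -- remove a[i+1]
        refine ⟨i + 1, by omega, ?_⟩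
        intro k hk
        have hk' : k + 1 < a.length - 1 := by rw [herlen (i + 1) (by omega)] at hk; omega
        rcases Nat.lt_trichotomy k i with hc | hc | hc
        · have e1 : (a.eraseIdx (i + 1))[k]'(by omega) = a[k]'(by omega) := by
            rw [List.getElem_eraseIdx, dif_pos (by omega)]
          have e2 : (a.eraseIdx (i + 1))[k + 1]'hk = a[k + 1]'(by omega) := by
            rw [List.getElem_eraseIdx, dif_pos (by omega)]
          rw [e1, e2]; exact hOnly k (by omega) (by omega)
        · have e1 : (a.eraseIdx (i + 1))[k]'(by omega) = a[k]'(by omega) := by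
            rw [List.getElem_eraseIdx, dif_pos (by omega)]
          have e2 : (a.eraseIdx (i + 1))[k + 1]'hk = a[k + 2]'(by omega) := by
            rw [List.getElem_eraseIdx, dif_neg (by omega)]
          rw [e1, e2]
          rcases hr with h0 | ⟨hlt2, hlt⟩
          · omega
          · have hv := hlt hlt2
            simp only [hc]
            exact hv
        · have e1 : (a.eraseIdx (i + 1))[k]'(by omega) = a[k + 1]'(by omega) := by
            rw [List.getElem_eraseIdx, dif_neg (by omega)]
          have e2 : (a.eraseIdx (i + 1))[k + 1]'hk = a[k + 2]'(by omega) := by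
            rw [List.getElem_eraseIdx, dif_neg (by omega)]
          rw [e1, e2]; exact hOnly (k + 1) (by omega) (by omega)
    · rintro ⟨j, hjlen, hP⟩
      by_cases hji : j ≠ i ∧ j ≠ i + 1
      · exact absurd (erase_keeps_pair a j hjlen hP i hi1 hji.1 hji.2) (by omega)
      · push_neg at hji
        by_cases hje : j = i
        · subst hje
          by_cases hj0 : j = 0
          · exact Or.inl (Or.inl hj0)
          · have hidx : (j - 1) + 1 < (a.eraseIdx j).length := by
              rw [herlen j (by omega)]; omega
            have := hP (j - 1) hidx
            have e1 : (a.eraseIdx j)[j - 1]'(by omega) = a[j - 1]'(by omega) := by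
              rw [List.getElem_eraseIdx, dif_pos (by omega)]
            have e2 : (a.eraseIdx j)[(j - 1) + 1]'hidx = a[j + 1]'hi1 := by
              rw [List.getElem_eraseIdx, dif_neg (by omega)]
              congr 1; omega
            rw [e1, e2] at this
            exact Or.inl (Or.inr ⟨by omega, fun _ => this⟩)
        · have hje1 : j = i + 1 := hji hje
          subst hje1
          by_cases hj2 : i + 2 = a.length
          · exact Or.inr (Or.inl hj2)
          · have hidx : i + 1 < (a.eraseIdx (i + 1)).length := by
              rw [herlen (i + 1) (by omega)]; omega
            have := hP i hidx
            have e1 : (a.eraseIdx (i + 1))[i]'(by omega) = a[i]'(by omega) := by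
              rw [List.getElem_eraseIdx, dif_pos (by omega)]
            have e2 : (a.eraseIdx (i + 1))[i + 1]'hidx = a[i + 2]'(by omega) := by
              rw [List.getElem_eraseIdx, dif_neg (by omega)]
            rw [e1, e2] at this
            exact Or.inr (Or.inr ⟨by omega, fun _ => this⟩)
  · -- at least two violations
    simp only [List.map_cons, List.length_cons]
    rw [if_pos (by simp), show (((t'.length + 1 + 1 : Nat) == 0) = false) by simp]
    simp only [Bool.false_eq_true, false_iff]
    rintro ⟨j, hjlen, hP⟩
    have hiB : i ∈ pvBad a := by rw [hBc]; simp
    have ht0B : t0 ∈ pvBad a := by rw [hBc]; simp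
    have hlt : i < t0 := by
      have hpw : (pvBad a).Pairwise (· < ·) := List.Pairwise.filter _ List.pairwise_lt_range
      rw [hBc] at hpw
      exact (List.pairwise_cons.mp hpw).1 t0 (by simp)
    rw [mem_pvBad] at hiB ht0B
    obtain ⟨hi1, hile'⟩ := hiB
    obtain ⟨ht1, ht0le'⟩ := ht0B
    have hile := hile' hi1
    have ht0le := ht0le' ht1
    by_cases hji : j ≠ i ∧ j ≠ i + 1
    · exact absurd (erase_keeps_pair a j hjlen hP i hi1 hji.1 hji.2) (by omega)
    · push_neg at hji
      have hjle : j ≤ i + 1 := by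
        by_cases h : j = i
        · omega
        · rw [hji h]
      by_cases hjt : j ≠ t0 ∧ j ≠ t0 + 1
      · exact absurd (erase_keeps_pair a j hjlen hP t0 ht1 hjt.1 hjt.2) (by omega)
      · push_neg at hjt
        have hj : j = t0 := by
          by_cases h : j = t0
          · exact h
          · have := hjt h; omega
        have hit : i + 1 = t0 := by omega
        have hidx : i + 1 < (a.eraseIdx j).length := by
          rw [herlen j (by omega)]; omega
        have := hP i hidx
        have e1 : (a.eraseIdx j)[i]'(by omega) = a[i]'(by omega) := by
          rw [List.getElem_eraseIdx, dif_pos (by omega)]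
        have e2 : (a.eraseIdx j)[i + 1]'hidx = a[t0 + 1]'(by omega) := by
          rw [List.getElem_eraseIdx, dif_neg (by omega)]
          congr 1; omega
        rw [e1, e2] at this
        have hch : a[t0 + 1]'(by omega) ≤ a[i]'(by omega) := by
          have hm : a[t0]'(by omega) = a[i + 1]'(by omega) := by congr 1; omega
          calc a[t0 + 1]'(by omega) ≤ a[t0]'(by omega) := ht0le
            _ = a[i + 1]'(by omega) := hm
            _ ≤ a[i]'(by omega) := hile
        omega

lemma all_adj (l : List Int) (R : Int → Int → Bool) :
    ((PySem.List.pyRange 0 ((l.length : Int) - 1) 1).all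
      (fun i => R (PySem.List.pyGetD l i 0) (PySem.List.pyGetD l (i + 1) 0)) = true)
    ↔ pvAdj (fun a b => R a b = true) l := by
  rw [List.all_eq_true]
  exact mem_adj l (fun a b => R a b = true)

lemma pvAdj_map_neg (x : List Int) :
    pvAdj (· < ·) (x.map (fun v => -v)) ↔ pvAdj (fun a b => b < a) x := by
  unfold pvAdj
  constructor <;> intro H j hj
  · have := H j (by simpa using hj)
    simp only [List.getElem_map] at this
    omega
  · have hj2 : j + 1 < (x.map (fun v => -v)).length := by simpa using hj
    simp only [List.getElem_map]
    have := H j (by simpa using hj2)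
    omega

lemma pvOne_neg_iff (l : List Int) (h3 : 3 ≤ l.length) :
    pvOne (l.map (fun x => -x)) = true ↔ ∃ k < l.length, pvAdj (fun a b => b < a) (l.eraseIdx k) := by
  rw [pvOne_iff _ (by simpa using h3)]
  simp only [List.length_map]
  constructor <;> rintro ⟨k, hk, hP⟩ <;> refine ⟨k, hk, ?_⟩
  · rw [List.eraseIdx_map] at hP
    exact (pvAdj_map_neg _).mp hP
  · rw [List.eraseIdx_map]
    exact (pvAdj_map_neg _).mpr hP

lemma pvAdj_le_iff_pairwise (l : List Int) : pvAdj (· ≤ ·) l ↔ l.Pairwise (· ≤ ·) := by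
  rw [← List.isChain_iff_pairwise, List.isChain_iff_getElem]
  exact Iff.rfl

lemma pvAdj_ge_iff_pairwise (l : List Int) :
    pvAdj (fun a b => b ≤ a) l ↔ l.Pairwise (fun a b => b ≤ a) := by
  rw [← @List.isChain_iff_pairwise Int (fun a b => b ≤ a) l ⟨fun h1 h2 => le_trans h2 h1⟩,
    List.isChain_iff_getElem]
  exact Iff.rfl

-- ===== VERDICT (by name: the statement is the Claim_ definition above) =====
theorem almost_sorted_spec : Claim_equal_almost_sorted := by
  intro lst _
  unfold Spec_almost_sorted
  rw [Bool.eq_iff_iff]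
  simp only [almost_sorted, almost_sorted_alt]
  have hN1 : ((PySem.List.pyRange 0 ((lst.length : Int) - 1) 1).all
      (fun i => decide (PySem.List.pyGetD lst i 0 ≤ PySem.List.pyGetD lst (i + 1) 0)) = true)
      ↔ lst.Pairwise (· ≤ ·) := by
    rw [all_adj lst (fun a b => decide (a ≤ b)), ← pvAdj_le_iff_pairwise]
    exact pvAdj_congr lst (fun a b => by simp)
  have hN2 : ((PySem.List.pyRange 0 ((lst.length : Int) - 1) 1).all
      (fun i => decide (PySem.List.pyGetD lst i 0 ≥ PySem.List.pyGetD lst (i + 1) 0)) = true)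
      ↔ lst.Pairwise (fun a b => b ≤ a) := by
    rw [all_adj lst (fun a b => decide (a ≥ b)), ← pvAdj_ge_iff_pairwise]
    exact pvAdj_congr lst (fun a b => by simp)
  by_cases hs : lst.Pairwise (· ≤ ·) ∨ lst.Pairwise (fun a b => b ≤ a)
  · rcases hs with h | h
    · have hA := (guard1_iff lst).mpr h
      rw [if_pos (Or.inl hA : lst = PySem.List.sorted lst (fun x => x) false ∨
        lst = (PySem.List.sorted lst (fun x => x) false).reverse)]
      have hB := hN1.mpr h
      simp [hB]
    · have hA := (guard2_iff lst).mpr h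
      rw [if_pos (Or.inr hA : lst = PySem.List.sorted lst (fun x => x) false ∨
        lst = (PySem.List.sorted lst (fun x => x) false).reverse)]
      have hB := hN2.mpr h
      simp [hB]
  · push_neg at hs
    obtain ⟨hle, hge⟩ := hs
    have h3 : 3 ≤ lst.length := by
      have h1 : ¬ pvAdj (· ≤ ·) lst := fun h => hle ((pvAdj_le_iff_pairwise lst).mp h)
      have h2 : ¬ pvAdj (fun a b => b ≤ a) lst := fun h => hge ((pvAdj_ge_iff_pairwise lst).mp h)
      unfold pvAdj at h1 h2
      push_neg at h1 h2
      obtain ⟨j1, hj1, hv1⟩ := h1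
      obtain ⟨j2, hj2, hv2⟩ := h2
      have : j1 ≠ j2 := by rintro rfl; omega
      omega
    have hA' : ¬(lst = PySem.List.sorted lst (fun x => x) false ∨
        lst = (PySem.List.sorted lst (fun x => x) false).reverse) := by
      rintro (h | h)
      exacts [hle ((guard1_iff lst).mp h), hge ((guard2_iff lst).mp h)]
    have hB1 := Bool.eq_false_iff.mpr (fun hx => hle (hN1.mp hx))
    have hB2 := Bool.eq_false_iff.mpr (fun hx => hge (hN2.mp hx))
    rw [if_neg hA']
    simp only [hB1, hB2, Bool.or_self]
    rw [if_neg (by simp)]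
    rw [A_loop_iff lst, Bool.or_eq_true, pvOne_iff lst h3, pvOne_neg_iff lst h3]
    constructor
    · rintro ⟨k, hk, hsf⟩
      rw [pvSf_iff] at hsf
      rcases hsf.2 with h | h
      · exact Or.inl ⟨k, hk, h⟩
      · exact Or.inr ⟨k, hk, h⟩
    · have herlen : ∀ j, j < lst.length → (lst.eraseIdx j).length = lst.length - 1 := by
        intro j hj; rw [List.length_eraseIdx]; simp [hj]
      rintro (⟨k, hk, h⟩ | ⟨k, hk, h⟩) <;> refine ⟨k, hk, ?_⟩ <;> rw [pvSf_iff] <;>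
        rw [herlen k hk]
      · exact ⟨by omega, Or.inl h⟩
      · exact ⟨by omega, Or.inr h⟩
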